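-- pv_equiv track=rewrite | github.com/birdwatcheryebo/ndl-dice-roller | dice_roller2.py | partSets
-- ===== SOURCE A (Python) =====
-- def partSets(call):
--     wkgLst = []
--     currStr = ''
--     # initialize
--     for i in range(len(call)):
--         if call[i].isdigit():
--             currStr += call[i]
--             # if we find a digit, add it to the curr(ent) Str(ing) holder
--         elif call[i] in ['d', 'D']:
--             currStr += 'd'
--             # if we find a 'd' slap that in there
--         else:
--             # we've found something that's not 'd' or a digit
--             wkgLst.append(currStr)
--             # store curr(ent) Str(ing) in w(or)k(in)g List
--             wkgLst.append(call[i])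
--             # add whatever we just found to working list
--             currStr = ''
--             # clear out currStr holder for next use
--     wkgLst.append(currStr)
--     # add whatever we had in currStr when we get to the end
--     return wkgLst
-- ===== SOURCE B (Python) =====
-- def partSets(call):
--     # Scan for separator positions; tokens are taken as slices between
--     # separators, normalised by mapping 'd'/'D' to 'd' at extraction time.
--     out = []
--     start = 0
--     for i, c in enumerate(call):
--         if not (c.isdigit() or c in 'dD'):
--             out.append(''.join('d' if ch in 'dD' else ch for ch in call[start:i]))
--             out.append(c)
--             start = i + 1
--     out.append(''.join('d' if ch in 'dD' else ch for ch in call[start:]))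
--     return out
-- ===== Notes on version B (the rewrite author's own statement) =====
-- stated objective: alternative
-- what changed: B scans for separator positions and extracts each token as a slice of the input (mapping d/D to 'd' at extraction time), instead of A's char-by-char currStr accumulator that is flushed at separators.
import Mathlib
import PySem

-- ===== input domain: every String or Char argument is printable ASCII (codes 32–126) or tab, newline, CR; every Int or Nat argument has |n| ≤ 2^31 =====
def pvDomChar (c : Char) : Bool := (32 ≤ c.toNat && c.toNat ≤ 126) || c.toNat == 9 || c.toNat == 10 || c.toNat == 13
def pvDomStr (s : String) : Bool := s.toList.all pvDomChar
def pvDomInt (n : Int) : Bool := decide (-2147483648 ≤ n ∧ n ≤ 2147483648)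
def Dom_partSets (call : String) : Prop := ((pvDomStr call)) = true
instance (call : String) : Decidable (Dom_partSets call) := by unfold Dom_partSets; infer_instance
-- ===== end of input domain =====

-- B records separator positions and extracts each token as a slice (mapping d/D to 'd'
-- at extraction), instead of A's character-by-character accumulator string; objective:
-- alternative decomposition, same cost.
-- Char.isDigit is exact for Python's str.isdigit on the ASCII domain Dom_partSets.

-- ===== PORT A =====
-- for i in range(len(call)): ported as structural recursion over call.toList,
-- threading (wkgLst, currStr) exactly as A does.
def partSetsLoopA (cs : List Char) (wkgLst : List String) (currStr : String) : List String :=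
  match cs with
  | [] => wkgLst ++ [currStr]
  | c :: rest =>
      if c.isDigit then
        partSetsLoopA rest wkgLst (currStr.push c)
      else if c = 'd' ∨ c = 'D' then
        partSetsLoopA rest wkgLst (currStr.push 'd')
      else
        partSetsLoopA rest (wkgLst ++ [currStr, String.ofList [c]]) ""

def partSets (call : String) : List String := partSetsLoopA call.toList [] ""

-- ===== PORT B =====
-- 'd' if ch in 'dD' else ch  (the generator inside ''.join, applied by map to a slice)
def replD (ch : Char) : Char := if ch = 'd' ∨ ch = 'D' then 'd' else ch

-- for i, c in enumerate(call): recursion over the remaining chars, carrying i and start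
def partSetsLoopB (call : List Char) (cs : List Char) (i start : Nat) (out : List String) : List String :=
  match cs with
  | [] => out ++ [String.ofList ((PySem.List.slice call (some (start : Int)) none).map replD)]
  | c :: rest =>
      if ¬ (c.isDigit ∨ c = 'd' ∨ c = 'D') then
        partSetsLoopB call rest (i + 1) (i + 1)
          (out ++ [String.ofList ((PySem.List.slice call (some (start : Int)) (some (i : Int))).map replD),
                   String.ofList [c]])
      else
        partSetsLoopB call rest (i + 1) start out

def partSets_alt (call : String) : List String :=
  partSetsLoopB call.toList call.toList 0 0 []

-- ===== PRECONDITION & SPEC =====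
def Spec_partSets (call : String) (out : List String) : Prop := out = partSets_alt call
instance (call : String) (out : List String) : Decidable (Spec_partSets call out) := by unfold Spec_partSets; infer_instance

-- ===== CLAIM (what is proved, stated in full; the proofs are below) =====
def Claim_equal_partSets : Prop := ∀ (call : String), Dom_partSets call → Spec_partSets call (partSets call)

-- ===== LEMMAS AND PROOFS =====

theorem push_ofList (l : List Char) (c : Char) :
    (String.ofList l).push c = String.ofList (l ++ [c]) := by
  apply String.ext; simp

theorem loopA_eq_loopB (call : List Char) (cs : List Char) (i start : Nat)
    (wkg : List String) (hcs : cs = call.drop i) (hsi : start ≤ i) (hil : i ≤ call.length) :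
    partSetsLoopA cs wkg (String.ofList (((call.drop start).take (i - start)).map replD))
      = partSetsLoopB call cs i start wkg := by
  induction cs generalizing i start wkg with
  | nil =>
      have hlen : i = call.length := by
        have := List.drop_eq_nil_iff.mp hcs.symm; omega
      rw [partSetsLoopA, partSetsLoopB, PySem.List.slice_from_natCast]
      have htake : (call.drop start).take (i - start) = call.drop start := by
        apply List.take_of_length_le; simp; omega
      rw [htake]
  | cons c rest ih =>
      have hi : i < call.length := by
        by_contra h
        have hnil : call.drop i = [] := List.drop_eq_nil_iff.mpr (by omega)
        rw [hnil] at hcs; exact (List.cons_ne_nil _ _) hcs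
      have hrest : rest = call.drop (i + 1) := by
        have hdd : call.drop (i + 1) = (call.drop i).drop 1 := by
          rw [List.drop_drop]
        rw [hdd, ← hcs, List.drop_one, List.tail_cons]
      have hget : call[i]? = some c := by
        have h0 : (call.drop i)[0]? = call[i + 0]? := by rw [List.getElem?_drop]
        rw [← hcs] at h0; simpa using h0.symm
      have htake1 : ∀ s : Nat, s ≤ i →
          (call.drop s).take (i + 1 - s) = (call.drop s).take (i - s) ++ [c] := by
        intro s hs
        have h1 : i + 1 - s = (i - s) + 1 := by omega
        rw [h1, List.take_add_one]
        have h2 : (call.drop s)[i - s]? = call[s + (i - s)]? := by rw [List.getElem?_drop]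
        have h3 : s + (i - s) = i := by omega
        rw [h3, hget] at h2
        simp [h2]
      rw [partSetsLoopA, partSetsLoopB]
      by_cases hd : c.isDigit
      · have hnd : ¬ (c = 'd' ∨ c = 'D') := by
          rintro (rfl | rfl) <;> simp [Char.isDigit] at hd
        rw [if_pos hd, if_neg (show ¬ ¬ (c.isDigit = true ∨ c = 'd' ∨ c = 'D') by simp [hd])]
        have hcurr : (String.ofList (((call.drop start).take (i - start)).map replD)).push c
            = String.ofList (((call.drop start).take (i + 1 - start)).map replD) := by
          rw [push_ofList, htake1 start hsi, List.map_append]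
          simp [replD, hnd]
        rw [hcurr]
        exact ih (i + 1) start wkg hrest (by omega) (by omega)
      · by_cases hdD : c = 'd' ∨ c = 'D'
        · rw [if_neg hd, if_pos hdD,
            if_neg (show ¬ ¬ (c.isDigit = true ∨ c = 'd' ∨ c = 'D') by simp [hdD])]
          have hcurr : (String.ofList (((call.drop start).take (i - start)).map replD)).push 'd'
              = String.ofList (((call.drop start).take (i + 1 - start)).map replD) := by
            rw [push_ofList, htake1 start hsi, List.map_append]
            simp [replD, hdD]
          rw [hcurr]
          exact ih (i + 1) start wkg hrest (by omega) (by omega)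
        · rw [if_neg hd, if_neg hdD,
            if_pos (show ¬ (c.isDigit = true ∨ c = 'd' ∨ c = 'D') by
              rintro (h | h) <;> [exact hd h; exact hdD h])]
          rw [PySem.List.slice_natCast]
          have h0 : String.ofList ((((call.drop (i + 1)).take ((i + 1) - (i + 1))).map replD)) = "" := by
            simp
          rw [← h0]
          exact ih (i + 1) (i + 1) _ hrest (by omega) (by omega)

-- ===== VERDICT (by name: the statement is the Claim_ definition above) =====
theorem partSets_spec : Claim_equal_partSets := by
  intro call _
  unfold Spec_partSets partSets partSets_alt
  have := loopA_eq_loopB call.toList call.toList 0 0 [] (by simp) (le_refl 0) (by simp)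
  simpa using this
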